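-- pv_equiv track=rewrite | github.com/electronsandstuff/Advent-of-Code-2021 | day_14/puzzles.py | first_char_pair_occurances
-- ===== SOURCE A (Python) =====
-- def first_char_pair_occurances(ps):
--     occ = {}
--     for p in ps:
--         c = p[0]  # Don't double count
--         if c not in occ:
--             occ[c] = 0
--         occ[c] += ps[p]
--     return occ
-- ===== SOURCE B (Python) =====
-- def first_char_pair_occurances(ps):
--     # simpler: ordered-dedup of first characters, then one sum comprehension per distinct first char
--     seen = dict.fromkeys(p[0] for p in ps)
--     return {c: sum(v for k, v in ps.items() if k[0] == c) for c in seen}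
-- ===== Notes on version B (the rewrite author's own statement) =====
-- stated objective: simpler
-- what changed: Replaces A's single-pass dict accumulation (membership test, zero-init, in-place add) by an ordered dedup of first characters followed by one per-character sum comprehension over the items.
import Mathlib
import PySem

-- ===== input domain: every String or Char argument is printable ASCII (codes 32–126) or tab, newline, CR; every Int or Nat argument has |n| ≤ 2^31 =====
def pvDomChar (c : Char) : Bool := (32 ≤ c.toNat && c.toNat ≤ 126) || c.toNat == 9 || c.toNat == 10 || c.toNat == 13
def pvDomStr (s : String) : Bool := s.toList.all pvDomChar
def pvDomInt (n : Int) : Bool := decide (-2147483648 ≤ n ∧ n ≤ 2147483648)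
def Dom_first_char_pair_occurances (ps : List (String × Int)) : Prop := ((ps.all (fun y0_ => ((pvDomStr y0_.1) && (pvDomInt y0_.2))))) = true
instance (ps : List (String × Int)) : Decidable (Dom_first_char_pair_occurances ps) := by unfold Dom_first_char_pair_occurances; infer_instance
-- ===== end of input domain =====

-- B replaces A's single-pass dict accumulation by an ordered dedup of first characters
-- followed by one sum comprehension per distinct first char; equal values, same key order.

-- Python's p[0] as a 1-character string ('none' = IndexError on "" is excluded by Pre_)
def pvFirst (s : String) : String :=
  match PySem.Str.pyGet? s 0 with
  | some ch => String.ofList [ch]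
  | none => ""

-- ===== PORT A =====
-- 'for p in ps' over the dict's keys; 'ps[p]' is the dict lookup (p is always a key, so
-- the KeyError branch of the lookup is unreachable; getD's default 0 is never used);
-- 'if c not in occ: occ[c] = 0' then 'occ[c] += ps[p]' (an in-place overwrite).
def first_char_pair_occurances (ps : List (String × Int)) : List (String × Int) :=
  (ps.foldl (fun occ p =>
      let c := pvFirst p.1
      let occ' := if occ.contains c then occ else occ.insert c 0
      occ'.insert c (occ'.getD c 0 + (PySem.Dict.mk ps).getD p.1 0)
    ) PySem.Dict.empty).items

-- ===== PORT B =====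
-- seen = dict.fromkeys(p[0] for p in ps); {c: sum(v for k, v in ps.items() if k[0] == c) for c in seen}
def first_char_pair_occurances_alt (ps : List (String × Int)) : List (String × Int) :=
  let seen := PySem.List.dedup (ps.map (fun p => pvFirst p.1))
  seen.map (fun c => (c, ((ps.filter (fun q => pvFirst q.1 == c)).map (fun q => q.2)).sum))

-- ===== PRECONDITION & SPEC =====
-- Pre_ excludes empty-string keys, on which A raises IndexError at p[0], and duplicate keys,
-- which a Python dict cannot carry, so the association-list behaviour there is accidental.
def Pre_first_char_pair_occurances (ps : List (String × Int)) : Prop :=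
  (∀ p ∈ ps, p.1 ≠ "") ∧ (ps.map Prod.fst).Nodup
instance (ps : List (String × Int)) : Decidable (Pre_first_char_pair_occurances ps) := by
  unfold Pre_first_char_pair_occurances; infer_instance

def pvWitness_first_char_pair_occurances : (List (String × Int)) := [("ab", 2), ("ac", -1), ("ba", 3)]

def Spec_first_char_pair_occurances (ps : List (String × Int)) (out : List (String × Int)) : Prop := out = first_char_pair_occurances_alt ps
instance (ps : List (String × Int)) (out : List (String × Int)) : Decidable (Spec_first_char_pair_occurances ps out) := by unfold Spec_first_char_pair_occurances; infer_instance

-- ===== CLAIM (what is proved, stated in full; the proofs are below) =====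
def Claim_equal_first_char_pair_occurances : Prop := ∀ (ps : List (String × Int)), Dom_first_char_pair_occurances ps → Pre_first_char_pair_occurances ps → Spec_first_char_pair_occurances ps (first_char_pair_occurances ps)

-- ===== LEMMAS AND PROOFS =====

-- the per-first-char sum B computes
def pvSum (c : String) (ps : List (String × Int)) : Int :=
  ((ps.filter (fun q => pvFirst q.1 == c)).map (fun q => q.2)).sum

lemma pvSum_append (c : String) (ps : List (String × Int)) (a : String × Int) :
    pvSum c (ps ++ [a]) = pvSum c ps + (if pvFirst a.1 == c then a.2 else 0) := by
  simp only [pvSum, List.filter_append, List.map_append, List.sum_append]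
  by_cases h : pvFirst a.1 == c <;> simp [List.filter, h]

lemma pvSum_eq_zero (c : String) (ps : List (String × Int))
    (h : c ∉ ps.map (fun p => pvFirst p.1)) : pvSum c ps = 0 := by
  have : ps.filter (fun q => pvFirst q.1 == c) = [] := by
    rw [List.filter_eq_nil_iff]
    intro q hq hbeq
    exact h (List.mem_map.mpr ⟨q, hq, by simpa using hbeq⟩)
  simp [pvSum, this]

-- A's loop (with 'ps[p]' already replaced by p.2) builds exactly B's dict
lemma foldA_eq (ps : List (String × Int)) :
    ps.foldl (fun occ p =>
        let c := pvFirst p.1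
        let occ' := if occ.contains c then occ else occ.insert c 0
        occ'.insert c (occ'.getD c 0 + p.2)) PySem.Dict.empty
      = PySem.Dict.mk ((PySem.Set.ofList (ps.map (fun p => pvFirst p.1))).map
          (fun c => (c, pvSum c ps))) := by
  induction ps using List.reverseRecOn with
  | nil => rfl
  | append_singleton ps a ih =>
    rw [List.foldl_append, ih, List.foldl_cons, List.foldl_nil]
    have hseen : PySem.Set.ofList ((ps ++ [a]).map (fun p => pvFirst p.1))
        = PySem.Set.add (PySem.Set.ofList (ps.map (fun p => pvFirst p.1))) (pvFirst a.1) := by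
      rw [PySem.Set.ofList_eq_foldl, PySem.Set.ofList_eq_foldl, List.map_append,
        List.foldl_append, List.map_cons, List.map_nil, List.foldl_cons, List.foldl_nil]
    set seen := PySem.Set.ofList (ps.map (fun p => pvFirst p.1)) with hseendef
    set c := pvFirst a.1 with hc
    have hnodup : seen.Nodup := by rw [hseendef]; exact PySem.Set.nodup_ofList _
    have hkeys : (PySem.Dict.mk (seen.map (fun c' => (c', pvSum c' ps)))).keys = seen := by
      simp [PySem.Dict.keys_mk, List.map_map, Function.comp_def]
    have hcont : (PySem.Dict.mk (seen.map (fun c' => (c', pvSum c' ps)))).contains c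
        = decide (c ∈ seen) := by
      rw [PySem.Dict.contains_eq_decide_mem_keys, hkeys]
    by_cases hmem : c ∈ seen
    · -- first char already seen: overwrite in place
      have hcontT : (PySem.Dict.mk (seen.map (fun c' => (c', pvSum c' ps)))).contains c = true := by
        rw [hcont]; simpa using hmem
      have hgetD : (PySem.Dict.mk (seen.map (fun c' => (c', pvSum c' ps)))).getD c 0 = pvSum c ps := by
        apply PySem.Dict.getD_of_mem_items _ _ (by rw [hkeys]; exact hnodup)
        exact List.mem_map.mpr ⟨c, hmem, rfl⟩
      have hseen' : PySem.Set.ofList ((ps ++ [a]).map (fun p => pvFirst p.1)) = seen := by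
        rw [hseen, PySem.Set.add]
        simp [PySem.Set.contains, hmem]
      apply PySem.Dict.ext
      simp only [hcontT, if_true, hgetD]
      rw [PySem.Dict.items_insert_of_contains _ _ hcontT, hseen']
      show (seen.map (fun c' => (c', pvSum c' ps))).map _ = seen.map _
      rw [List.map_map]
      apply List.map_congr_left
      intro c' hc'
      by_cases h : c' = c
      · subst h; simp [pvSum_append, hc]
      · have hcc : (c' == c) = false := by simpa using h
        have hf : (pvFirst a.1 == c') = false := by
          rw [← hc]; simpa using fun e => h e.symm
        simp [Function.comp, hcc, pvSum_append, hf]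
    · -- new first char: occ[c] = 0 appends, then occ[c] += v overwrites in place
      have hcontF : (PySem.Dict.mk (seen.map (fun c' => (c', pvSum c' ps)))).contains c = false := by
        rw [hcont]; simpa using hmem
      have hseen' : PySem.Set.ofList ((ps ++ [a]).map (fun p => pvFirst p.1)) = seen ++ [c] := by
        rw [hseen, PySem.Set.add]
        simp [PySem.Set.contains, hmem]
      apply PySem.Dict.ext
      simp only [hcontF, Bool.false_eq_true, if_false]
      rw [PySem.Dict.getD_insert_self, PySem.Dict.insert_insert_self,
        PySem.Dict.items_insert_of_not_contains _ _ hcontF, hseen', List.map_append]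
      have hzero : pvSum c ps = 0 := by
        apply pvSum_eq_zero
        intro h; exact hmem (by rw [hseendef]; exact (PySem.Set.mem_ofList _ _).mpr h)
      congr 1
      · apply List.map_congr_left
        intro c' hc'
        have h : c' ≠ c := fun h => hmem (h ▸ hc')
        have hf : (pvFirst a.1 == c') = false := by
          rw [← hc]; simpa using fun e => h e.symm
        simp [pvSum_append, hf]
      · simp [pvSum_append, ← hc, hzero]

-- under Nodup keys, the dict lookup ps[p] returns p's own value
lemma lookup_self (ps : List (String × Int)) (hnd : (ps.map Prod.fst).Nodup)
    (p : String × Int) (hp : p ∈ ps) : (PySem.Dict.mk ps).getD p.1 0 = p.2 := by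
  exact PySem.Dict.getD_of_mem_items _ hp (by simpa [PySem.Dict.keys_mk] using hnd) 0

-- ===== VERDICT (by name: the statement is the Claim_ definition above) =====
theorem first_char_pair_occurances_spec : Claim_equal_first_char_pair_occurances := by
  intro ps _ hpre
  unfold Spec_first_char_pair_occurances first_char_pair_occurances first_char_pair_occurances_alt
  rw [PySem.List.foldl_congr_mem _ _
      (fun occ p =>
        let c := pvFirst p.1
        let occ' := if occ.contains c then occ else occ.insert c 0
        occ'.insert c (occ'.getD c 0 + p.2)) _
      (by intro acc p hp; simp only [lookup_self ps hpre.2 p hp]),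
    foldA_eq]
  have : PySem.List.dedup (ps.map (fun p => pvFirst p.1))
      = PySem.Set.ofList (ps.map (fun p => pvFirst p.1)) := by
    simp [PySem.List.dedup]
  simp only [this]
  rfl
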